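-- pv_equiv track=rewrite | github.com/Nemukemo/AlpacaCTF_writeup | 2026/01/03/solve_ruby_v2.py | get_generator23_sequence
-- ===== SOURCE A (Python) =====
-- def get_generator23_sequence(n):
--     # Prime::Generator23.new.take(n) の挙動を模倣
--     # 実際には 2, 3, 5, 7, 11, 13, 17, 19, 23, 25, 29, 31, 35, 37...
--     # となる（2と3の倍数以外の数、ただし最初の2,3は含まれると仮定）
--
--     seq = [2, 3]
--     candidate = 5
--     while len(seq) < n:
--         if candidate % 2 != 0 and candidate % 3 != 0:
--             seq.append(candidate)
--         candidate += 1
--     return seq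
-- ===== SOURCE B (Python) =====
-- def get_generator23_sequence(n):
--     seq = [2, 3]
--     candidate = 5
--     step = 2
--     while len(seq) < n:
--         seq.append(candidate)
--         candidate += step
--         step = 6 - step
--     return seq
-- ===== Notes on version B (the rewrite author's own statement) =====
-- stated objective: faster
-- what changed: Replaces the try-every-integer loop with its per-candidate divisibility test by an alternating-step wheel that appends every candidate unconditionally, so the inner branch and the skipped iterations disappear.
import Mathlib
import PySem

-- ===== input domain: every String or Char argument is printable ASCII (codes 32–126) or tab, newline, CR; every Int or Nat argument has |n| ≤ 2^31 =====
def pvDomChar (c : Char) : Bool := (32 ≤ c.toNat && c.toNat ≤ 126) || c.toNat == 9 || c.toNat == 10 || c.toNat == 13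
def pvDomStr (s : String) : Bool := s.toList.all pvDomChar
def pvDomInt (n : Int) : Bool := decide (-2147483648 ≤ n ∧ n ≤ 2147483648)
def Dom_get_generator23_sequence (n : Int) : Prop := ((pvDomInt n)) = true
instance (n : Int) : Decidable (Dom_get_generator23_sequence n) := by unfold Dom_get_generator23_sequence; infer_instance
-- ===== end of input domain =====

-- B replaces A's try-every-integer loop (divisibility test on each candidate) by an
-- alternating-step wheel that appends every candidate unconditionally (measured constant-factor faster).

-- ===== PORT A =====
-- distance (in +1 steps) from c to the next integer coprime to 6; termination measure helper for loopA
def pvDistA (c : Int) : Nat :=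
  if c % 6 = 1 ∨ c % 6 = 5 then 0
  else if c % 6 = 0 then 1
  else if c % 6 = 2 then 3
  else if c % 6 = 3 then 2
  else 1

lemma pvDistA_le (c : Int) : pvDistA c ≤ 4 := by
  unfold pvDistA; split_ifs <;> omega

lemma pvDistA_skip (c : Int) (h : c % 2 = 0 ∨ c % 3 = 0) : pvDistA (c + 1) < pvDistA c := by
  unfold pvDistA; split_ifs <;> omega

lemma pymod (c b : Int) (hb : 0 < b) : PySem.Int.mod c b = c % b :=
  PySem.Int.mod_eq_emod_of_pos hb

def loopA (n : Int) (seq : List Int) (c : Int) : List Int :=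
  if (seq.length : Int) < n then
    if PySem.Int.mod c 2 ≠ 0 ∧ PySem.Int.mod c 3 ≠ 0 then
      loopA n (seq ++ [c]) (c + 1)
    else
      loopA n seq (c + 1)
  else seq
termination_by (n - seq.length).toNat * 5 + pvDistA c
decreasing_by
  · have h4 := pvDistA_le (c + 1)
    simp only [List.length_append, List.length_cons, List.length_nil]
    omega
  · rename_i _ hcond
    have hskip : c % 2 = 0 ∨ c % 3 = 0 := by
      rw [pymod c 2 (by norm_num), pymod c 3 (by norm_num)] at hcond
      omega
    have := pvDistA_skip c hskip
    omega

def get_generator23_sequence (n : Int) : List Int := loopA n [2, 3] 5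

-- ===== PORT B =====
def loopB (n : Int) (seq : List Int) (c step : Int) : List Int :=
  if (seq.length : Int) < n then
    loopB n (seq ++ [c]) (c + step) (6 - step)
  else seq
termination_by (n - seq.length).toNat
decreasing_by
  simp only [List.length_append, List.length_cons, List.length_nil]
  omega

def get_generator23_sequence_alt (n : Int) : List Int := loopB n [2, 3] 5 2

-- ===== PRECONDITION & SPEC =====
def Spec_get_generator23_sequence (n : Int) (out : List Int) : Prop := out = get_generator23_sequence_alt n
instance (n : Int) (out : List Int) : Decidable (Spec_get_generator23_sequence n out) := by unfold Spec_get_generator23_sequence; infer_instance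

-- ===== CLAIM (what is proved, stated in full; the proofs are below) =====
def Claim_equal_get_generator23_sequence : Prop := ∀ (n : Int), Dom_get_generator23_sequence n → Spec_get_generator23_sequence n (get_generator23_sequence n)

-- ===== LEMMAS AND PROOFS =====

-- joint invariant: from a candidate ≡ 5 (mod 6) with step 2, or ≡ 1 (mod 6) with step 4,
-- the filtering loop and the wheel loop produce the same list.
lemma loop_eq (k : Nat) : ∀ (n : Int) (seq : List Int) (c : Int),
    (n - seq.length).toNat ≤ k →
    (c % 6 = 5 → loopA n seq c = loopB n seq c 2) ∧
    (c % 6 = 1 → loopA n seq c = loopB n seq c 4) := by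
  induction k with
  | zero =>
    intro n seq c hk
    have hguard : ¬ ((seq.length : Int) < n) := by omega
    constructor <;> intro _ <;> rw [loopA, loopB] <;> simp [hguard]
  | succ k ih =>
    intro n seq c hk
    by_cases hguard : (seq.length : Int) < n
    case neg =>
      constructor <;> intro _ <;> rw [loopA, loopB] <;> simp [hguard]
    case pos =>
      have hk' : (n - ((seq ++ [c]).length : Int)).toNat ≤ k := by
        simp only [List.length_append, List.length_cons, List.length_nil]
        omega
      constructor
      · intro h5
        have hc2 : PySem.Int.mod c 2 ≠ 0 := by rw [pymod c 2 (by norm_num)]; omega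
        have hc3 : PySem.Int.mod c 3 ≠ 0 := by rw [pymod c 3 (by norm_num)]; omega
        rw [loopA]
        simp only [hguard, if_true, hc2, hc3, ne_eq, not_false_eq_true, and_self, if_true]
        rw [loopB]
        simp only [hguard, if_true]
        norm_num
        by_cases h2 : ((seq ++ [c]).length : Int) < n
        · -- one skipped candidate c+1 (divisible by 2), then c+2 ≡ 1 (mod 6)
          have hs2 : ¬ (PySem.Int.mod (c + 1) 2 ≠ 0 ∧ PySem.Int.mod (c + 1) 3 ≠ 0) := by
            rw [pymod (c+1) 2 (by norm_num)]; omega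
          rw [loopA]
          simp only [h2, if_true, hs2, if_false]
          have : c + 1 + 1 = c + 2 := by ring
          rw [this]
          exact (ih n (seq ++ [c]) (c + 2) hk').2 (by omega)
        · have h2' : ¬ ((seq.length : Int) + 1 < n) := by
            simp only [List.length_append, List.length_cons, List.length_nil] at h2
            push_cast at h2 ⊢; omega
          rw [loopA, loopB]
          simp only [List.length_append, List.length_cons, List.length_nil]
          push_cast
          simp [h2']
      · intro h1
        have hc2 : PySem.Int.mod c 2 ≠ 0 := by rw [pymod c 2 (by norm_num)]; omega
        have hc3 : PySem.Int.mod c 3 ≠ 0 := by rw [pymod c 3 (by norm_num)]; omega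
        rw [loopA]
        simp only [hguard, if_true, hc2, hc3, ne_eq, not_false_eq_true, and_self, if_true]
        rw [loopB]
        simp only [hguard, if_true]
        norm_num
        by_cases h2 : ((seq ++ [c]).length : Int) < n
        · -- three skipped candidates c+1, c+2, c+3, then c+4 ≡ 5 (mod 6)
          have hs1 : ¬ (PySem.Int.mod (c + 1) 2 ≠ 0 ∧ PySem.Int.mod (c + 1) 3 ≠ 0) := by
            rw [pymod (c+1) 2 (by norm_num)]; omega
          have hs2 : ¬ (PySem.Int.mod (c + 1 + 1) 2 ≠ 0 ∧ PySem.Int.mod (c + 1 + 1) 3 ≠ 0) := by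
            rw [pymod (c+1+1) 3 (by norm_num)]; omega
          have hs3 : ¬ (PySem.Int.mod (c + 1 + 1 + 1) 2 ≠ 0 ∧ PySem.Int.mod (c + 1 + 1 + 1) 3 ≠ 0) := by
            rw [pymod (c+1+1+1) 2 (by norm_num)]; omega
          rw [loopA]; simp only [h2, if_true, hs1, if_false]
          rw [loopA]; simp only [h2, if_true, hs2, if_false]
          rw [loopA]; simp only [h2, if_true, hs3, if_false]
          have : c + 1 + 1 + 1 + 1 = c + 4 := by ring
          rw [this]
          exact (ih n (seq ++ [c]) (c + 4) hk').1 (by omega)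
        · have h2' : ¬ ((seq.length : Int) + 1 < n) := by
            simp only [List.length_append, List.length_cons, List.length_nil] at h2
            push_cast at h2 ⊢; omega
          rw [loopA, loopB]
          simp only [List.length_append, List.length_cons, List.length_nil]
          push_cast
          simp [h2']

-- ===== VERDICT (by name: the statement is the Claim_ definition above) =====
theorem get_generator23_sequence_spec : Claim_equal_get_generator23_sequence := by
  intro n _
  unfold Spec_get_generator23_sequence get_generator23_sequence get_generator23_sequence_alt
  exact (loop_eq (n - ([2, 3] : List Int).length).toNat n [2, 3] 5 (le_refl _)).1 (by decide)
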